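-- pv_equiv track=rewrite | github.com/qwint/Archipelago | worlds/hk_rework/state_mixin.py | em_lt
-- ===== SOURCE A (Python) =====
-- def em_lt(state1: dict, state2: dict) -> bool:
--     """Counter-like strict subset comparison"""
--     if not state1.keys() <= state2.keys():
--         # state1 is not a subset of state2, so state1 has some keys not present in state2
--         return False
--     if len(state2) > len(state1):
--         # state2 has some extra keys, so even if every key in state1 has the same value as in state2, state1 is
--         # still a strict subset of state2.
--         for key, v1 in state1.items():
--             if v1 > state2[key]:
--                 return False
--         return True
--     else:  # noqa: RET505
--         # state2 has the same keys as state1, so at least one key in state1 must have a lower value than in state2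
--         less_than = False
--         for key, v1 in state1.items():
--             v2 = state2[key]
--             if v1 > v2:
--                 # state1 has a larger value than state2 for this key, so state1 is not a subset of state2
--                 return False
--             # todo: How to best optimise this?
--             if v1 < v2:
--                 # state1's value is less than state2's, so state1 could be a strict subset of state2
--                 less_than = True
--         return less_than
-- ===== SOURCE B (Python) =====
-- def em_lt(state1: dict, state2: dict) -> bool:
--     """Counter-like strict subset comparison"""
--     strict = False
--     matched = 0
--     for k, v2 in state2.items():
--         if k in state1:
--             v1 = state1[k]
--             if v1 > v2:
--                 return False
--             if v1 < v2:
--                 strict = True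
--             matched += 1
--         else:
--             strict = True
--     if matched != len(state1):
--         # some key of state1 never appeared in state2: not a subset
--         return False
--     return strict
-- ===== Notes on version B (the rewrite author's own statement) =====
-- stated objective: alternative
-- what changed: B makes a single pass over state2 (not state1) carrying a matched-key counter and a strictness flag: the counter check afterwards replaces A's up-front keys-subset guard, a missing key in state1 sets strictness instead of A's length comparison, so B has one loop where A has a guard plus two branch-duplicated loops.
import Mathlib
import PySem

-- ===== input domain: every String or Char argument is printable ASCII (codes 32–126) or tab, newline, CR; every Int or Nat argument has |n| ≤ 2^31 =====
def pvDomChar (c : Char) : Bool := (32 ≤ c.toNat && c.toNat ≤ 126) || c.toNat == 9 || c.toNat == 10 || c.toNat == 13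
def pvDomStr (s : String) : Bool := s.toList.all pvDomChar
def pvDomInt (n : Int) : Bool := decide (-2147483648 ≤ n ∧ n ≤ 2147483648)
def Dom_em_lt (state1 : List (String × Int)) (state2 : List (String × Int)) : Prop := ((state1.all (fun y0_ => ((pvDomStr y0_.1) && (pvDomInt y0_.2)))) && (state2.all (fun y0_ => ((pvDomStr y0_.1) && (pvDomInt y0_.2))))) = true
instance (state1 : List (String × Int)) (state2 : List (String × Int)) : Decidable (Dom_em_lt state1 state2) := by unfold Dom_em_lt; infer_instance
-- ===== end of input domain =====

-- B replaces A's keys-subset guard and two branch-duplicated loops by ONE pass over state2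
-- carrying a matched-key counter and a strictness flag — alternative decomposition, same cost.


-- ===== PORT A =====
-- first loop of A: 'for key, v1 in state1.items(): if v1 > state2[key]: return False / return True'
-- state2[key] is ported as getD _ 0: A only runs this loop after the keys-subset guard, so the
-- default is never consulted (KeyError is unreachable).
def emLtLoopBig (d2 : PySem.Dict String Int) : List (String × Int) → Bool
  | [] => true
  | (k, v1) :: rest => if v1 > d2.getD k 0 then false else emLtLoopBig d2 rest

-- second loop of A, carrying the mutable 'less_than' flag
def emLtLoopEq (d2 : PySem.Dict String Int) : List (String × Int) → Bool → Bool
  | [], lessThan => lessThan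
  | (k, v1) :: rest, lessThan =>
      let v2 := d2.getD k 0
      if v1 > v2 then false
      else if v1 < v2 then emLtLoopEq d2 rest true
      else emLtLoopEq d2 rest lessThan

def em_lt (state1 : List (String × Int)) (state2 : List (String × Int)) : Bool :=
  let d1 := PySem.Dict.ofList state1
  let d2 := PySem.Dict.ofList state2
  if ¬ (d1.keys.all fun k => d2.contains k) then false
  else if d2.size > d1.size then emLtLoopBig d2 d1.items
  else emLtLoopEq d2 d1.items false

-- ===== PORT B =====
-- B's single loop over state2's items, carrying (strict, matched); the trailing
-- 'if matched != len(state1): return False; return strict' is the base case.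
def emLtAltLoop (d1 : PySem.Dict String Int) (n1 : Nat) :
    List (String × Int) → Bool → Nat → Bool
  | [], strict, matched => if matched ≠ n1 then false else strict
  | (k, v2) :: rest, strict, matched =>
      if d1.contains k then
        let v1 := d1.getD k 0
        if v1 > v2 then false
        else if v1 < v2 then emLtAltLoop d1 n1 rest true (matched + 1)
        else emLtAltLoop d1 n1 rest strict (matched + 1)
      else emLtAltLoop d1 n1 rest true matched

def em_lt_alt (state1 : List (String × Int)) (state2 : List (String × Int)) : Bool :=
  let d1 := PySem.Dict.ofList state1
  let d2 := PySem.Dict.ofList state2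
  emLtAltLoop d1 d1.size d2.items false 0

-- ===== PRECONDITION & SPEC =====
def Spec_em_lt (state1 : List (String × Int)) (state2 : List (String × Int)) (out : Bool) : Prop := out = em_lt_alt state1 state2
instance (state1 : List (String × Int)) (state2 : List (String × Int)) (out : Bool) : Decidable (Spec_em_lt state1 state2 out) := by unfold Spec_em_lt; infer_instance

-- ===== CLAIM =====
def Claim_equal_em_lt : Prop := ∀ (state1 : List (String × Int)) (state2 : List (String × Int)), Dom_em_lt state1 state2 → Spec_em_lt state1 state2 (em_lt state1 state2)

-- ===== LEMMAS AND PROOFS =====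
theorem emLtLoopBig_eq_any (d2 : PySem.Dict String Int) (l : List (String × Int)) :
    emLtLoopBig d2 l = ! l.any (fun p => decide (p.2 > d2.getD p.1 0)) := by
  induction l with
  | nil => rfl
  | cons p rest ih =>
      obtain ⟨k, v1⟩ := p
      simp only [emLtLoopBig, List.any_cons]
      by_cases h : v1 > d2.getD k 0 <;> simp [h, ih]

theorem emLtLoopEq_eq_any (d2 : PySem.Dict String Int) (l : List (String × Int)) (lt : Bool) :
    emLtLoopEq d2 l lt =
      if l.any (fun p => decide (p.2 > d2.getD p.1 0)) then false
      else lt || l.any (fun p => decide (p.2 < d2.getD p.1 0)) := by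
  induction l generalizing lt with
  | nil => simp [emLtLoopEq]
  | cons p rest ih =>
      obtain ⟨k, v1⟩ := p
      simp only [emLtLoopEq, List.any_cons]
      by_cases hgt : v1 > d2.getD k 0
      · simp [hgt]
      · by_cases hlt : v1 < d2.getD k 0 <;> simp [hgt, hlt, ih]

theorem emLtAltLoop_eq (d1 : PySem.Dict String Int) (n1 : Nat)
    (l : List (String × Int)) (strict : Bool) (matched : Nat) :
    emLtAltLoop d1 n1 l strict matched =
      if l.any (fun p => d1.contains p.1 && decide (d1.getD p.1 0 > p.2)) then false
      else if matched + l.countP (fun p => d1.contains p.1) = n1 then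
        strict || l.any (fun p => !d1.contains p.1 || decide (d1.getD p.1 0 < p.2))
      else false := by
  induction l generalizing strict matched with
  | nil => simp [emLtAltLoop]
  | cons p rest ih =>
      obtain ⟨k, v2⟩ := p
      simp only [emLtAltLoop, List.any_cons, List.countP_cons]
      by_cases hc : d1.contains k = true
      · simp only [hc]
        by_cases hgt : d1.getD k 0 > v2
        · simp [hgt]
        · by_cases hlt : d1.getD k 0 < v2 <;>
          · simp only [hgt, hlt, if_true, if_false, ih, decide_true, decide_false]
            have : matched + 1 + rest.countP (fun p => d1.contains p.1) =
                matched + (rest.countP (fun p => d1.contains p.1) + 1) := by omega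
            simp [this]
      · simp only [Bool.not_eq_true] at hc
        simp [hc, ih]

-- ===== VERDICT =====
-- items.any equals keys.any through getD, for a Nodup-keyed dict
theorem any_items_eq_any_keys (d : PySem.Dict String Int) (hnd : d.keys.Nodup)
    (P : String → Int → Bool) :
    d.items.any (fun p => P p.1 p.2) = d.keys.any (fun k => P k (d.getD k 0)) := by
  conv_lhs => rw [PySem.Dict.items_eq_map_keys d hnd 0]
  rw [List.any_map]
  simp only [Function.comp_def]

theorem countP_items_contains (d1 d2 : PySem.Dict String Int) :
    d2.items.countP (fun p => d1.contains p.1)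
      = (d2.keys.filter (fun k => d1.contains k)).length := by
  simp only [PySem.Dict.keys]
  simp [List.filter_map, Function.comp_def, List.countP_eq_length_filter]

-- ===== VERDICT =====
theorem em_lt_spec : Claim_equal_em_lt := by
  intro state1 state2 _
  unfold Spec_em_lt em_lt em_lt_alt
  set d1 := PySem.Dict.ofList state1 with hd1
  set d2 := PySem.Dict.ofList state2 with hd2
  have hnd1 : d1.keys.Nodup := PySem.Dict.nodup_keys_ofList state1
  have hnd2 : d2.keys.Nodup := PySem.Dict.nodup_keys_ofList state2
  rw [emLtAltLoop_eq, countP_items_contains d1 d2]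
  have hkeys1 : d1.keys.length = d1.size := by
    simp [PySem.Dict.keys, PySem.Dict.size]
  have hkeys2 : d2.keys.length = d2.size := by
    simp [PySem.Dict.keys, PySem.Dict.size]
  have hmemk : ∀ (d : PySem.Dict String Int) (k : String), d.contains k = true ↔ k ∈ d.keys := by
    intro d k; exact PySem.Dict.contains_iff_mem_keys d k
  by_cases hsub : (d1.keys.all fun k => d2.contains k) = true
  · -- keys of state1 are a subset of keys of state2
    have hsub' : ∀ k ∈ d1.keys, d2.contains k = true := by
      intro k hk; exact List.all_eq_true.mp hsub k hk
    -- the matched counter reaches len(state1)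
    have hcnt : (d2.keys.filter fun k => d1.contains k).length = d1.size := by
      rw [← hkeys1]
      refine List.Perm.length_eq ((List.perm_ext_iff_of_nodup (hnd2.filter _) hnd1).mpr ?_)
      intro a
      simp only [List.mem_filter]
      constructor
      · rintro ⟨_, hc⟩; exact (hmemk d1 a).mp hc
      · intro ha
        exact ⟨(hmemk d2 a).mp (hsub' a ha), (hmemk d1 a).mpr ha⟩
    -- the two over-large-value scans agree
    have hbigeq : (d1.items.any fun p => decide (p.2 > d2.getD p.1 0))
        = (d2.items.any fun p => d1.contains p.1 && decide (d1.getD p.1 0 > p.2)) := by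
      rw [any_items_eq_any_keys d1 hnd1 (fun k v => decide (v > d2.getD k 0)),
        any_items_eq_any_keys d2 hnd2 (fun k v => d1.contains k && decide (d1.getD k 0 > v))]
      rw [Bool.eq_iff_iff]
      simp only [List.any_eq_true, Bool.and_eq_true, decide_eq_true_eq]
      constructor
      · rintro ⟨k, hk, hgt⟩
        exact ⟨k, (hmemk d2 k).mp (hsub' k hk), (hmemk d1 k).mpr hk, hgt⟩
      · rintro ⟨k, _, hc, hgt⟩
        exact ⟨k, (hmemk d1 k).mp hc, hgt⟩
    rw [if_neg (by simp [hsub])]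
    by_cases hbig : (d2.items.any fun p => d1.contains p.1 && decide (d1.getD p.1 0 > p.2)) = true
    · -- some value in state1 exceeds state2's: everything is False
      rw [if_pos hbig]
      by_cases hlen : d2.size > d1.size
      · rw [if_pos hlen, emLtLoopBig_eq_any, hbigeq, hbig]; rfl
      · rw [if_neg hlen, emLtLoopEq_eq_any, hbigeq, if_pos hbig]
    · rw [if_neg hbig]
      have hc0 : 0 + (List.filter (fun k => d1.contains k) d2.keys).length = d1.size := by omega
      rw [if_pos hc0, Bool.false_or]
      have hbig1 : (d1.items.any fun p => decide (p.2 > d2.getD p.1 0)) = false := by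
        rw [hbigeq]; exact Bool.not_eq_true _ ▸ hbig
      by_cases hlen : d2.size > d1.size
      · -- extra key in state2: A returns True, B's strictness flag was set by the miss
        rw [if_pos hlen, emLtLoopBig_eq_any, hbig1]
        have hex : ∃ a ∈ d2.keys, ¬ (d1.contains a = true) := by
          by_contra hc
          push Not at hc
          rw [List.length_filter_eq_length_iff.mpr (by simpa using hc)] at hcnt
          omega
        obtain ⟨a, ha, hnc⟩ := hex
        rw [any_items_eq_any_keys d2 hnd2 (fun k v => !d1.contains k || decide (d1.getD k 0 < v))]
        have : (d2.keys.any fun k => !d1.contains k || decide (d1.getD k 0 < d2.getD k 0)) = true := by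
          refine List.any_eq_true.mpr ⟨a, ha, ?_⟩
          simp [Bool.not_eq_true _ ▸ hnc]
        rw [this]; rfl
      · -- same key set: both reduce to 'some value strictly smaller'
        rw [if_neg hlen, emLtLoopEq_eq_any, if_neg (by simp [hbig1]), Bool.false_or]
        have hall2 : ∀ k ∈ d2.keys, d1.contains k = true := by
          have hle : (d2.keys.filter fun k => d1.contains k).length ≤ d2.keys.length :=
            List.length_filter_le _ _
          have : (d2.keys.filter fun k => d1.contains k).length = d2.keys.length := by omega
          exact fun k hk => List.length_filter_eq_length_iff.mp this k hk
        rw [any_items_eq_any_keys d1 hnd1 (fun k v => decide (v < d2.getD k 0)),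
          any_items_eq_any_keys d2 hnd2 (fun k v => !d1.contains k || decide (d1.getD k 0 < v))]
        rw [Bool.eq_iff_iff]
        simp only [List.any_eq_true, Bool.or_eq_true, Bool.not_eq_true', decide_eq_true_eq]
        constructor
        · rintro ⟨k, hk, hlt⟩
          exact ⟨k, (hmemk d2 k).mp (hsub' k hk), Or.inr hlt⟩
        · rintro ⟨k, hk, h⟩
          rcases h with hc | hlt
          · exact absurd (hall2 k hk) (by simp [hc])
          · exact ⟨k, (hmemk d1 k).mp (hall2 k hk), hlt⟩
  · -- some key of state1 is missing from state2: A's guard fires; B's counter falls short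
    rw [if_pos hsub]
    have hex : ∃ k ∈ d1.keys, ¬ d2.contains k = true := by
      by_contra hc
      push Not at hc
      exact hsub (List.all_eq_true.mpr fun k hk => hc k hk)
    have hlt : (d2.keys.filter fun k => d1.contains k).length < d1.size := by
      obtain ⟨k0, hk0, hnc⟩ := hex
      rw [← hkeys1, ← List.toFinset_card_of_nodup hnd1,
        ← List.toFinset_card_of_nodup (hnd2.filter _)]
      refine Finset.card_lt_card ⟨?_, fun hc => ?_⟩
      · intro a ha
        simp only [List.mem_toFinset, List.mem_filter] at ha ⊢
        exact (hmemk d1 a).mp ha.2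
      · have hk0f : k0 ∈ (d2.keys.filter fun k => d1.contains k).toFinset := by
          exact hc (by simpa using hk0)
        simp only [List.mem_toFinset, List.mem_filter] at hk0f
        exact absurd ((hmemk d2 k0).mpr hk0f.1) (by simp [hnc])
    by_cases hbig : (d2.items.any fun p => d1.contains p.1 && decide (d1.getD p.1 0 > p.2)) = true
    · rw [if_pos hbig]
    · rw [if_neg hbig, if_neg (by omega)]
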